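-- pv_equiv track=rewrite | github.com/MrBrantCode/unitest_baseline | mut_generate/mist_train_cf/cf_10841/solution.py | find_most_frequent_name
-- ===== SOURCE A (Python) =====
-- def find_most_frequent_name(names):
--     frequency = {}
--     max_frequency = 0
--     most_frequent_name = ""
--
--     for name in names:
--         if name in frequency:
--             frequency[name] += 1
--         else:
--             frequency[name] = 1
--
--         if frequency[name] > max_frequency:
--             max_frequency = frequency[name]
--             most_frequent_name = name
--
--     return most_frequent_name
-- ===== SOURCE B (Python) =====
-- def find_most_frequent_name(names):
--     # The winner is the name at the first position where the running
--     # frequency attains its overall peak.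
--     seen = {}
--     running = []
--     for name in names:
--         seen[name] = seen.get(name, 0) + 1
--         running.append(seen[name])
--     if not running:
--         return ""
--     return names[running.index(max(running))]
-- ===== Notes on version B (the rewrite author's own statement) =====
-- stated objective: alternative
-- what changed: A's fused single pass tracking an incremental maximum and best name is replaced by materializing the list of running frequencies and returning names[running.index(max(running))], the name at the first position where the running frequency peaks.
import Mathlib
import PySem

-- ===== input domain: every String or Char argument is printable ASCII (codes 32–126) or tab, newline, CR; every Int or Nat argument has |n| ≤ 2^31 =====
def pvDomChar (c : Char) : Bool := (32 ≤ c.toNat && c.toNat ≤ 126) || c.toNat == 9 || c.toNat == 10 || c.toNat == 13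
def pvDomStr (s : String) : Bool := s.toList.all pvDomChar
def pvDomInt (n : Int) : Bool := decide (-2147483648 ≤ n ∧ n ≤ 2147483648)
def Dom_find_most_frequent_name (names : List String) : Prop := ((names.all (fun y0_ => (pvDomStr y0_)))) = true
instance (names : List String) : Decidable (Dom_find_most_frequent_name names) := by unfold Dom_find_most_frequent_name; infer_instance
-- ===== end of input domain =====

-- B replaces A's fused single pass (incremental max + best-name tracking) by materializing the
-- running-frequency list and returning the name at the first position where it peaks (objective: alternative).


-- ===== PORT A =====
def find_most_frequent_name (names : List String) : String :=
  (names.foldl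
    (fun (st : PySem.Dict String Int × Int × String) name =>
      let frequency := if st.1.contains name then st.1.modify name 0 (fun v => v + 1)
                       else st.1.insert name 1
      if frequency.getD name 0 > st.2.1 then (frequency, frequency.getD name 0, name)
      else (frequency, st.2.1, st.2.2))
    (PySem.Dict.empty, 0, "")).2.2

-- ===== PORT B =====
def find_most_frequent_name_alt (names : List String) : String :=
  let st := names.foldl
    (fun (st : PySem.Dict String Int × List Int) name =>
      let seen := st.1.insert name (st.1.getD name 0 + 1)
      (seen, st.2 ++ [seen.getD name 0]))
    ((PySem.Dict.empty : PySem.Dict String Int), [])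
  let running := st.2
  if running = [] then ""
  else
    let m := (PySem.List.max? running (fun x => x)).getD 0   -- max(running); running ≠ [] here
    match PySem.List.index? running m with
    | some i => (PySem.List.pyGet? names (i : Int)).getD ""  -- names[running.index(m)]; always in range
    | none => ""

-- ===== PRECONDITION & SPEC =====
def Spec_find_most_frequent_name (names : List String) (out : String) : Prop := out = find_most_frequent_name_alt names
instance (names : List String) (out : String) : Decidable (Spec_find_most_frequent_name names out) := by unfold Spec_find_most_frequent_name; infer_instance

-- ===== CLAIM (what is proved, stated in full; the proofs are below) =====
def Claim_equal_find_most_frequent_name : Prop := ∀ (names : List String), Dom_find_most_frequent_name names → Spec_find_most_frequent_name names (find_most_frequent_name names)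

-- ===== LEMMAS AND PROOFS =====

-- count of x in l, as an Int
def cnt (l : List String) (x : String) : Int := (List.count x l : Int)

-- A's loop, with the dict replaced by prefix counts
def refA : List String → List String → Int → String → String
  | _, [], _, b => b
  | pre, n :: rest, m, b =>
      if cnt pre n + 1 > m then refA (pre ++ [n]) rest (cnt pre n + 1) n
      else refA (pre ++ [n]) rest m b

-- first name whose running count reaches m; none = no position reaches m
def refScan? (m : Int) : List String → List String → Option String
  | _, [] => none
  | pre, n :: rest => if cnt pre n + 1 = m then some n else refScan? m (pre ++ [n]) rest

-- the running-frequency list of rest, continuing after prefix pre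
def pcL : List String → List String → List Int
  | _, [] => []
  | pre, n :: rest => (cnt pre n + 1) :: pcL (pre ++ [n]) rest

-- maximum of all total counts (0 for the empty list)
def mO (l : List String) : Int := (l.map (fun x => cnt l x)).foldl max 0

lemma cnt_nonneg (l : List String) (x : String) : 0 ≤ cnt l x := by
  simp [cnt]

lemma cnt_append_singleton (l : List String) (n x : String) :
    cnt (l ++ [n]) x = cnt l x + (if x = n then 1 else 0) := by
  by_cases h : x = n
  · subst h; simp [cnt, List.count_append]
  · simp [cnt, List.count_append, h, List.count_eq_zero]

lemma cnt_le_mO (l : List String) (x : String) : cnt l x ≤ mO l := by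
  by_cases hx : x ∈ l
  · exact (PySem.List.le_foldl_max _ 0).2 _ (List.mem_map.mpr ⟨x, hx, rfl⟩)
  · have h0 : cnt l x = 0 := by simp [cnt, List.count_eq_zero_of_not_mem hx]
    rw [h0]; exact (PySem.List.le_foldl_max _ 0).1

lemma mO_nonneg (l : List String) : 0 ≤ mO l := (PySem.List.le_foldl_max _ 0).1

lemma mO_append (l : List String) (n : String) :
    mO (l ++ [n]) = max (mO l) (cnt l n + 1) := by
  apply le_antisymm
  · rcases PySem.List.foldl_max_mem ((l ++ [n]).map (fun x => cnt (l ++ [n]) x)) 0 with h | h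
    · have h0 : mO (l ++ [n]) = 0 := h
      rw [h0]; exact le_max_of_le_left (mO_nonneg l)
    · rcases List.mem_map.mp h with ⟨x, _, hval⟩
      have hEq : mO (l ++ [n]) = cnt (l ++ [n]) x := hval.symm
      rw [hEq]
      by_cases hxe : x = n
      · subst hxe; rw [cnt_append_singleton, if_pos rfl]; exact le_max_right _ _
      · rw [cnt_append_singleton, if_neg hxe, add_zero]
        exact le_max_of_le_left (cnt_le_mO l x)
  · apply max_le
    · rcases PySem.List.foldl_max_mem (l.map (fun x => cnt l x)) 0 with h | h
      · have h0 : mO l = 0 := h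
        rw [h0]; exact mO_nonneg _
      · rcases List.mem_map.mp h with ⟨x, _, hval⟩
        have h0 : mO l = cnt l x := hval.symm
        rw [h0]
        refine le_trans ?_ (cnt_le_mO (l ++ [n]) x)
        have hc := cnt_append_singleton l n x
        by_cases hxe : x = n
        · rw [if_pos hxe] at hc; omega
        · rw [if_neg hxe] at hc; omega
    · have h := cnt_le_mO (l ++ [n]) n
      rw [cnt_append_singleton, if_pos rfl] at h; exact h

lemma refScan?_append (l1 l2 p : List String) (M : Int) :
    refScan? M p (l1 ++ l2) = (refScan? M p l1).or (refScan? M (p ++ l1) l2) := by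
  induction l1 generalizing p with
  | nil => simp [refScan?]
  | cons n rest ih =>
      simp only [List.cons_append, refScan?]
      split
      · simp
      · rw [ih]; simp [List.append_assoc]

lemma refScan?_none (l p : List String) (M : Int)
    (h : ∀ x, cnt (p ++ l) x < M) : refScan? M p l = none := by
  induction l generalizing p with
  | nil => simp [refScan?]
  | cons n rest ih =>
      have hn := h n
      have h1 : cnt (p ++ n :: rest) n = cnt p n + 1 + cnt rest n := by
        simp [cnt, List.count_append]
        omega
      have h2 : 0 ≤ cnt rest n := cnt_nonneg _ _
      simp only [refScan?]
      rw [if_neg (by omega)]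
      apply ih
      intro x
      have hx := h x
      simpa [List.append_assoc] using hx

lemma bridge : ∀ (rest pre : List String) (m : Int) (b : String),
    m = mO pre → (pre = [] → b = "") →
    refScan? m [] pre = (if pre = [] then none else some b) →
    refA pre rest m b = (refScan? (mO (pre ++ rest)) [] (pre ++ rest)).getD "" := by
  intro rest
  induction rest with
  | nil =>
      intro pre m b hm h0 hscan
      simp only [refA, List.append_nil, ← hm, hscan]
      by_cases hp : pre = [] <;> simp [hp, h0]
  | cons n rs ih =>
      intro pre m b hm h0 hscan
      have hassoc : pre ++ n :: rs = (pre ++ [n]) ++ rs := by simp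
      have hle : cnt pre n ≤ m := hm ▸ cnt_le_mO pre n
      simp only [refA]
      rw [hassoc]
      by_cases hc : cnt pre n + 1 > m
      · have hcm : cnt pre n = m := by omega
        rw [if_pos hc]
        apply ih
        · rw [mO_append, ← hm, hcm]; omega
        · simp
        · rw [refScan?_append pre [n] [] (cnt pre n + 1)]
          have hnone : refScan? (cnt pre n + 1) [] pre = none := by
            apply refScan?_none
            intro x
            have hx := cnt_le_mO pre x
            simp only [List.nil_append]
            omega
          rw [hnone]
          simp [Option.or, refScan?]
      · rw [if_neg hc]
        have hp : pre ≠ [] := by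
          intro hnil
          subst hnil
          have hm0 : m = 0 := by simpa [mO] using hm
          have hc0 : cnt ([] : List String) n = 0 := by simp [cnt]
          omega
        apply ih
        · rw [mO_append, ← hm]; omega
        · simp
        · rw [refScan?_append pre [n] [] m, hscan, if_neg hp]
          simp [Option.or]

-- A's fold equals refA when the dict holds the prefix counts
lemma foldA_eq : ∀ (rest : List String) (d : PySem.Dict String Int) (m : Int) (b : String)
    (pre : List String), (∀ y, d.getD y 0 = cnt pre y) →
    (rest.foldl
      (fun (st : PySem.Dict String Int × Int × String) name =>
        let frequency := if st.1.contains name then st.1.modify name 0 (fun v => v + 1)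
                         else st.1.insert name 1
        if frequency.getD name 0 > st.2.1 then (frequency, frequency.getD name 0, name)
        else (frequency, st.2.1, st.2.2))
      (d, m, b)).2.2 = refA pre rest m b := by
  intro rest
  induction rest with
  | nil => intro d m b pre _; simp [refA]
  | cons n rs ih =>
      intro d m b pre hd
      have hstep : ∀ y, (if d.contains n then d.modify n 0 (fun v => v + 1)
          else d.insert n 1).getD y 0 = cnt (pre ++ [n]) y := by
        intro y
        by_cases hcn : d.contains n
        · rw [if_pos hcn]
          by_cases hy : y = n
          · subst hy
            rw [PySem.Dict.getD_modify_self, hd, cnt_append_singleton, if_pos rfl]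
          · rw [PySem.Dict.getD_modify_of_ne d 0 (fun v => v + 1) hy, hd,
              cnt_append_singleton, if_neg hy, add_zero]
        · rw [if_neg hcn]
          by_cases hy : y = n
          · subst hy
            have h0 : d.getD y 0 = 0 := by
              rw [PySem.Dict.getD_of_not_contains]
              simpa using hcn
            rw [PySem.Dict.getD_insert_self, cnt_append_singleton, if_pos rfl, ← hd, h0]
            omega
          · rw [PySem.Dict.getD_insert_of_ne d 1 0 hy, hd,
              cnt_append_singleton, if_neg hy, add_zero]
      have hn : (if d.contains n then d.modify n 0 (fun v => v + 1)
          else d.insert n 1).getD n 0 = cnt pre n + 1 := by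
        rw [hstep n, cnt_append_singleton, if_pos rfl]
      simp only [List.foldl_cons]
      rw [hn]
      simp only [refA]
      by_cases hc : cnt pre n + 1 > m
      · rw [if_pos hc, if_pos hc]
        exact ih _ _ _ _ hstep
      · rw [if_neg hc, if_neg hc]
        exact ih _ _ _ _ hstep

-- B's loop builds the running-frequency list pcL
lemma foldB_eq : ∀ (rest : List String) (d : PySem.Dict String Int) (acc : List Int)
    (pre : List String), (∀ y, d.getD y 0 = cnt pre y) →
    (rest.foldl
      (fun (st : PySem.Dict String Int × List Int) name =>
        let seen := st.1.insert name (st.1.getD name 0 + 1)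
        (seen, st.2 ++ [seen.getD name 0]))
      (d, acc)).2 = acc ++ pcL pre rest := by
  intro rest
  induction rest with
  | nil => intro d acc pre _; simp [pcL]
  | cons n rs ih =>
      intro d acc pre hd
      have hstep : ∀ y, (d.insert n (d.getD n 0 + 1)).getD y 0 = cnt (pre ++ [n]) y := by
        intro y
        by_cases hy : y = n
        · subst hy
          rw [PySem.Dict.getD_insert_self, hd, cnt_append_singleton, if_pos rfl]
        · rw [PySem.Dict.getD_insert_of_ne _ _ _ hy, hd, cnt_append_singleton,
            if_neg hy, add_zero]
      have hn : (d.insert n (d.getD n 0 + 1)).getD n 0 = cnt pre n + 1 := by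
        rw [hstep n, cnt_append_singleton, if_pos rfl]
      simp only [List.foldl_cons]
      rw [hn, ih _ _ _ hstep]
      simp [pcL]

lemma pcL_append (l : List String) (n : String) : ∀ pre,
    pcL pre (l ++ [n]) = pcL pre l ++ [cnt (pre ++ l) n + 1] := by
  induction l with
  | nil => intro pre; simp [pcL]
  | cons x rs ih =>
      intro pre
      simp only [List.cons_append, pcL, ih, List.append_assoc]
      simp

-- the maximum of the running-frequency list is the maximum total count
lemma max_pcL (l : List String) : (pcL [] l).foldl max 0 = mO l := by
  induction l using List.reverseRecOn with
  | nil => simp [pcL, mO]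
  | append_singleton l n ih =>
      rw [pcL_append, List.foldl_append, mO_append, List.nil_append]
      simp [ih]

-- first index of the max in the running list, then names[i], equals refScan?
lemma scanB_eq : ∀ (rest pre : List String) (M : Int),
    (match PySem.List.index? (pcL pre rest) M with
     | some i => (PySem.List.pyGet? rest (i : Int)).getD ""
     | none => "") = (refScan? M pre rest).getD "" := by
  intro rest
  induction rest with
  | nil => intro pre M; simp [pcL, refScan?, PySem.List.index?]
  | cons n rs ih =>
      intro pre M
      simp only [pcL, refScan?]
      by_cases hc : cnt pre n + 1 = M
      · rw [hc, if_pos rfl, PySem.List.index?_cons_self]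
        simp
      · rw [if_neg hc, PySem.List.index?_cons_of_ne _ hc]
        cases hix : PySem.List.index? (pcL (pre ++ [n]) rs) M with
        | none =>
            have h2 := ih (pre ++ [n]) M
            rw [hix] at h2
            simp only [Option.map_none]
            exact h2
        | some i =>
            have h1 : PySem.List.pyGet? (n :: rs) ((i + 1 : Nat) : Int)
                = PySem.List.pyGet? rs (i : Int) := by
              have : ((i + 1 : Nat) : Int) = (i : Int) + 1 := by push_cast; ring
              rw [this, PySem.List.pyGet?_cons_succ]
            have h2 := ih (pre ++ [n]) M
            rw [hix] at h2
            simp only [Option.map_some]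
            rw [h1]
            exact h2

-- ===== VERDICT (by name: the statement is the Claim_ definition above) =====
theorem find_most_frequent_name_spec : Claim_equal_find_most_frequent_name := by
  intro names _
  unfold Spec_find_most_frequent_name find_most_frequent_name find_most_frequent_name_alt
  rw [foldA_eq names PySem.Dict.empty 0 "" []
    (fun y => by simp [PySem.Dict.getD_empty, cnt])]
  have hB : (names.foldl
      (fun (st : PySem.Dict String Int × List Int) name =>
        let seen := st.1.insert name (st.1.getD name 0 + 1)
        (seen, st.2 ++ [seen.getD name 0]))
      ((PySem.Dict.empty : PySem.Dict String Int), [])).2 = pcL [] names := by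
    simpa using foldB_eq names PySem.Dict.empty [] []
      (fun y => by simp [PySem.Dict.getD_empty, cnt])
  simp only [hB]
  have hA : refA [] names 0 "" = (refScan? (mO names) [] names).getD "" := by
    have := bridge names [] 0 "" (by simp [mO]) (fun _ => rfl) (by simp [refScan?])
    simpa using this
  rw [hA]
  cases names with
  | nil => simp [pcL, refScan?]
  | cons n rs =>
      have hne : pcL [] (n :: rs) ≠ [] := by simp [pcL]
      rw [if_neg hne]
      have hmax : (PySem.List.max? (pcL [] (n :: rs)) (fun x => x)).getD 0
          = mO (n :: rs) := by
        have h1 : pcL [] (n :: rs) = (cnt [] n + 1) :: pcL [n] rs := by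
          simp [pcL]
        rw [h1, PySem.List.max?_id_cons, Option.getD_some, ← max_pcL (n :: rs), h1]
        simp only [List.foldl_cons]
        have : max 0 (cnt [] n + 1) = cnt [] n + 1 := by
          have := cnt_nonneg [] n; omega
        rw [this]
      rw [hmax]
      exact (scanB_eq (n :: rs) [] (mO (n :: rs))).symm
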